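-- pv_equiv track=rewrite | github.com/Fishcuit/AhluicSim | forShane/sim7.py | count_clusters
-- ===== SOURCE A (Python) =====
-- def dfs(i, j, grid, wild='WD', non_cluster_symbols=('JT', 'BT')):
--     symbol = grid[i][j]
--     if symbol in non_cluster_symbols or symbol == wild:
--         return set()
--
--     stack = [(i, j)]
--     visited = set()
--     cluster_cells = set()
--     while stack:
--         x, y = stack.pop()
--         if (x, y) in visited:
--             continue
--         visited.add((x, y))
--         cluster_cells.add((x, y))
--         for dx, dy in [(0, 1), (0, -1), (1, 0), (-1, 0)]:
--             nx, ny = x + dx, y + dy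
--             if 0 <= nx < len(grid) and 0 <= ny < len(grid[0]):
--                 if grid[nx][ny] not in non_cluster_symbols and (grid[nx][ny] == symbol or grid[nx][ny] == wild):
--                     stack.append((nx, ny))
--
--     return cluster_cells if len(cluster_cells) >= 4 else set()
--
-- def dfs_wild(i, j, grid, non_cluster_symbols=['JT', 'BT'], wild='WD'):
--     symbol = grid[i][j]
--     if symbol != wild:
--         return set()
--
--     stack = [(i, j)]
--     visited = set()
--     cluster_cells = set()
--     while stack:
--         x, y = stack.pop()
--         if (x, y) in visited:
--             continue
--         visited.add((x, y))
--         cluster_cells.add((x, y))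
--         for dx, dy in [(0, 1), (0, -1), (1, 0), (-1, 0)]:
--             nx, ny = x + dx, y + dy
--             if 0 <= nx < len(grid) and 0 <= ny < len(grid[0]) and (nx, ny) not in visited:
--                 if grid[nx][ny] == wild:
--                     stack.append((nx, ny))
--         cluster_cells = set(cell for cell in cluster_cells if all(
--             0 > nx or nx >= len(grid) or 0 > ny or ny >= len(
--                 grid[0]) or grid[nx][ny] == wild or grid[nx][ny] in non_cluster_symbols
--             for dx, dy in [(0, 1), (0, -1), (1, 0), (-1, 0)]
--             for nx, ny in [(cell[0] + dx, cell[1] + dy)]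
--         ))
--
--     return cluster_cells if len(cluster_cells) >= 4 else set()
--
-- def count_clusters(grid):
--     all_cluster_cells = set()
--     clusters = []
--     cluster_sizes = []
--     cluster_symbols = []
--     # First phase
--     for i in range(len(grid)):
--         for j in range(len(grid[0])):
--             if (i, j) not in all_cluster_cells:
--                 cluster_cells = dfs(i, j, grid)
--                 if cluster_cells:
--                     all_cluster_cells.update(cluster_cells)
--                     clusters.append(cluster_cells)
--                     cluster_sizes.append(len(cluster_cells))
--                     cluster_symbols.append(grid[i][j])
--     # Second phase
--     for i in range(len(grid)):
--         for j in range(len(grid[0])):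
--             if (i, j) not in all_cluster_cells:
--                 cluster_cells = dfs_wild(i, j, grid)
--                 if cluster_cells:
--                     all_cluster_cells.update(cluster_cells)
--                     clusters.append(cluster_cells)
--                     cluster_sizes.append(len(cluster_cells))
--                     cluster_symbols.append(grid[i][j])
--
--     return len(clusters), list(zip(cluster_sizes, cluster_symbols))
-- ===== SOURCE B (Python) =====
-- def count_clusters(grid):
--     rows = len(grid)
--     cols = len(grid[0]) if grid else 0
--     wild = 'WD'
--     non_cluster = ('JT', 'BT')
--     cells = [(i, j) for i in range(rows) for j in range(cols)]
--
--     # positions of every symbol, grouped once (row-major within each group)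
--     by_symbol = {}
--     for (i, j) in cells:
--         by_symbol.setdefault(grid[i][j], []).append((i, j))
--     wilds = by_symbol.get(wild, [])
--
--     # min-label propagation (no traversal): every node cell repeatedly adopts the
--     # smallest label among itself and its node neighbours; at the fixpoint labels
--     # are constant exactly on the connected regions of the node graph.
--     # labels_for is a pure function of its key; the cache only memoizes it.
--     labels_cache = {}
--
--     def labels_for(key):
--         if key in labels_cache:
--             return labels_cache[key]
--         nodes = wilds if key is None else by_symbol.get(key, []) + wilds
--         label = {c: c for c in nodes}
--         get = label.get
--         changed = True
--         forward = True
--         while changed: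
--             changed = False
--             for c in (nodes if forward else reversed(nodes)):
--                 x, y = c
--                 m = label[c]
--                 for nb in ((x, y + 1), (x, y - 1), (x + 1, y), (x - 1, y)):
--                     v = get(nb)
--                     if v is not None and v < m:
--                         m = v
--                 if m != label[c]:
--                     label[c] = m
--                     changed = True
--             forward = not forward
--         comps = {}
--         for c in nodes:
--             comps.setdefault(label[c], []).append(c)
--         labels_cache[key] = (label, comps)
--         return label, comps
--
--     def component(seed, key):
--         label, comps = labels_for(key)
--         return set(comps[label[seed]])
--
--     def interior(cell):
--         x, y = cell
--         return all(not (0 <= nx < rows and 0 <= ny < cols)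
--                    or grid[nx][ny] == wild or grid[nx][ny] in non_cluster
--                    for nx, ny in ((x, y + 1), (x, y - 1), (x + 1, y), (x - 1, y)))
--
--     covered = set()
--     out = []
--     for phase in (1, 2):
--         for i in range(rows):
--             for j in range(cols):
--                 if (i, j) in covered:
--                     continue
--                 symbol = grid[i][j]
--                 if phase == 1:
--                     if symbol in non_cluster or symbol == wild:
--                         continue
--                     region = component((i, j), symbol)
--                 else:
--                     if symbol != wild:
--                         continue
--                     region = {c for c in component((i, j), None) if interior(c)}
--                 if len(region) >= 4:
--                     covered |= region
--                     out.append((len(region), symbol))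
--     return len(out), out
-- ===== Notes on version B (the rewrite author's own statement) =====
-- stated objective: alternative
-- what changed: Replaces A's per-seed DFS/stack flood fills by a traversal-free connected-component labelling: cell positions are grouped by symbol once, and each admissible node repeatedly adopts the smallest label among itself and its admissible neighbours in alternating row-major sweeps until a fixpoint, at which labels are constant exactly on connected regions; the wild boundary filter is applied once, and the two scan phases are merged into one parameterized scan building the (size, symbol) list directly.
import Mathlib
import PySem

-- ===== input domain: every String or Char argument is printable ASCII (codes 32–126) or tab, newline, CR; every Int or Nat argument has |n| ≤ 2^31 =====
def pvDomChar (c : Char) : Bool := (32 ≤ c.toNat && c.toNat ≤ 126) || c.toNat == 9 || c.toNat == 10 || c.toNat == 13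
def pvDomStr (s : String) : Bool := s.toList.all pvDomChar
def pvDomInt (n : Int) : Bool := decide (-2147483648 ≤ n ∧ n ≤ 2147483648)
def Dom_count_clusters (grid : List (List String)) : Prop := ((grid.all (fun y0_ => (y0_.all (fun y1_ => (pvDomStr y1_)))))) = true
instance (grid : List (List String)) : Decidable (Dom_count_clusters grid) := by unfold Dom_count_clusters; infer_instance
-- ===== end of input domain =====

-- B replaces A's per-seed stack-DFS flood fills by a traversal-free min-label propagation
-- (every admissible cell repeatedly adopts the smallest label among itself and its admissible
-- neighbours until a fixpoint), applies the wild boundary filter once, and merges the two scan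
-- phases into one parameterized scan; genuinely different algorithm, similar cost ("alternative").

abbrev PVCell := Int × Int

-- ===== PORT A =====
def pvDirs : List PVCell := [(0, 1), (0, -1), (1, 0), (-1, 0)]
def pvNC : List String := ["JT", "BT"]
def pvR (g : List (List String)) : Int := PySem.List.len g
def pvC (g : List (List String)) : Int := PySem.List.len (PySem.List.pyGetD g 0 [])
def pvGet (g : List (List String)) (x y : Int) : String :=
  PySem.List.pyGetD (PySem.List.pyGetD g x []) y ""
def pvFuelA (g : List (List String)) : Nat :=
  5 * (g.length * (PySem.List.pyGetD g 0 []).length) + 6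

/-- A's `dfs` while-loop: stack, visited, cluster_cells (fuel-bounded; fuel suffices under Pre_). -/
def dfsLoop (g : List (List String)) (symbol : String) :
    Nat → List PVCell → PySem.Set PVCell → PySem.Set PVCell → PySem.Set PVCell × PySem.Set PVCell
  | 0, _, v, c => (v, c)
  | _ + 1, [], v, c => (v, c)
  | f + 1, (x, y) :: st, v, c =>
    if (x, y) ∈ v then dfsLoop g symbol f st v c
    else
      let v' := PySem.Set.add v (x, y)
      let c' := PySem.Set.add c (x, y)
      let st' := pvDirs.foldl (fun s d =>
        if 0 ≤ x + d.1 ∧ x + d.1 < pvR g ∧ 0 ≤ y + d.2 ∧ y + d.2 < pvC g ∧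
            pvGet g (x + d.1) (y + d.2) ∉ pvNC ∧
            (pvGet g (x + d.1) (y + d.2) = symbol ∨ pvGet g (x + d.1) (y + d.2) = "WD")
        then (x + d.1, y + d.2) :: s else s) st
      dfsLoop g symbol f st' v' c'

def pvDfs (g : List (List String)) (i j : Int) : PySem.Set PVCell :=
  let symbol := pvGet g i j
  if symbol ∈ pvNC ∨ symbol = "WD" then []
  else
    let r := dfsLoop g symbol (pvFuelA g) [(i, j)] [] []
    if 4 ≤ r.2.length then r.2 else []

/-- the per-cell boundary filter of A's `dfs_wild` comprehension -/
def pvKeep (g : List (List String)) (cell : PVCell) : Bool :=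
  pvDirs.all fun d =>
    decide (0 > cell.1 + d.1 ∨ cell.1 + d.1 ≥ pvR g ∨ 0 > cell.2 + d.2 ∨ cell.2 + d.2 ≥ pvC g ∨
      pvGet g (cell.1 + d.1) (cell.2 + d.2) = "WD" ∨ pvGet g (cell.1 + d.1) (cell.2 + d.2) ∈ pvNC)

/-- A's `dfs_wild` while-loop, re-filtering cluster_cells each iteration. -/
def wildLoop (g : List (List String)) :
    Nat → List PVCell → PySem.Set PVCell → PySem.Set PVCell → PySem.Set PVCell × PySem.Set PVCell
  | 0, _, v, c => (v, c)
  | _ + 1, [], v, c => (v, c)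
  | f + 1, (x, y) :: st, v, c =>
    if (x, y) ∈ v then wildLoop g f st v c
    else
      let v' := PySem.Set.add v (x, y)
      let cmid := PySem.Set.add c (x, y)
      let st' := pvDirs.foldl (fun s d =>
        if (0 ≤ x + d.1 ∧ x + d.1 < pvR g ∧ 0 ≤ y + d.2 ∧ y + d.2 < pvC g ∧
            (x + d.1, y + d.2) ∉ v') ∧ pvGet g (x + d.1) (y + d.2) = "WD"
        then (x + d.1, y + d.2) :: s else s) st
      wildLoop g f st' v' (cmid.filter (pvKeep g))

def pvDfsWild (g : List (List String)) (i j : Int) : PySem.Set PVCell :=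
  let symbol := pvGet g i j
  if symbol ≠ "WD" then []
  else
    let r := wildLoop g (pvFuelA g) [(i, j)] [] []
    if 4 ≤ r.2.length then r.2 else []

structure PVStA where
  acc : PySem.Set PVCell
  clusters : List (PySem.Set PVCell)
  sizes : List Int
  symbols : List String

def pvStepA1 (g : List (List String)) (s : PVStA) (i j : Int) : PVStA :=
  if (i, j) ∈ s.acc then s
  else
    let cc := pvDfs g i j
    if cc ≠ [] then
      ⟨PySem.Set.update s.acc cc, s.clusters ++ [cc],
       s.sizes ++ [(cc.length : Int)], s.symbols ++ [pvGet g i j]⟩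
    else s

def pvStepA2 (g : List (List String)) (s : PVStA) (i j : Int) : PVStA :=
  if (i, j) ∈ s.acc then s
  else
    let cc := pvDfsWild g i j
    if cc ≠ [] then
      ⟨PySem.Set.update s.acc cc, s.clusters ++ [cc],
       s.sizes ++ [(cc.length : Int)], s.symbols ++ [pvGet g i j]⟩
    else s

def count_clusters (grid : List (List String)) : Int × (List (Int × String)) :=
  let s1 := (PySem.List.pyRange 0 (pvR grid) 1).foldl (fun s i =>
      (PySem.List.pyRange 0 (pvC grid) 1).foldl (fun s j => pvStepA1 grid s i j) s)
      ⟨[], [], [], []⟩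
  let s2 := (PySem.List.pyRange 0 (pvR grid) 1).foldl (fun s i =>
      (PySem.List.pyRange 0 (pvC grid) 1).foldl (fun s j => pvStepA2 grid s i j) s) s1
  (PySem.List.len s2.clusters, s2.sizes.zip s2.symbols)

-- ===== PORT B =====
def pvNbrs (c : PVCell) : List PVCell :=
  [(c.1, c.2 + 1), (c.1, c.2 - 1), (c.1 + 1, c.2), (c.1 - 1, c.2)]

/-- B's `cells` comprehension (row-major list of all grid positions). -/
def pvCellsList (g : List (List String)) : List PVCell :=
  (PySem.List.pyRange 0 (pvR g) 1).flatMap fun i =>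
    (PySem.List.pyRange 0 (pvC g) 1).map fun j => ((i, j) : PVCell)

/-- B's `by_symbol` grouping (`setdefault(..., []).append(c)` = modify with `++ [c]`). -/
def pvBySym (g : List (List String)) : PySem.Dict String (List PVCell) :=
  (pvCellsList g).foldl (fun d c => d.modify (pvGet g c.1 c.2) [] (· ++ [c]))
    PySem.Dict.empty

def pvWilds (g : List (List String)) : List PVCell :=
  (pvBySym g).getD "WD" []

/-- Python's `<` on pairs of ints (lexicographic). -/
def pvLtB (a b : PVCell) : Bool :=
  decide (a.1 < b.1) || (decide (a.1 = b.1) && decide (a.2 < b.2))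

/-- one cell of B's sweep: `m = label[c]; for nb ...: v = get(nb); if v is not None and v < m: m = v`
    (`label.getD c c` is exact for `label[c]` because `c` is always a key here). -/
def pvMinLabel (label : PySem.Dict PVCell PVCell) (c : PVCell) : PVCell :=
  (pvNbrs c).foldl (fun m nb =>
    match label.get? nb with
    | some v => if pvLtB v m then v else m
    | none => m) (label.getD c c)

/-- one cell of the in-place sweep: update `label[c]` and the `changed` flag. -/
def pvPAStep (p : PySem.Dict PVCell PVCell × Bool) (c : PVCell) :
    PySem.Dict PVCell PVCell × Bool :=
  let m := pvMinLabel p.1 c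
  if m ≠ p.1.getD c c then (p.1.insert c m, true) else p

/-- one full sweep over `order` with `changed = False` at the start. -/
def pvPassA (order : List PVCell) (label : PySem.Dict PVCell PVCell) :
    PySem.Dict PVCell PVCell × Bool :=
  order.foldl pvPAStep (label, false)

/-- B's `while changed` loop with alternating sweep direction
    (fuel-bounded; the fuel below provably suffices). -/
def pvPropLoop (nodes : List PVCell) :
    Nat → Bool → PySem.Dict PVCell PVCell → PySem.Dict PVCell PVCell
  | 0, _, label => label
  | f + 1, fwd, label =>
    let p := pvPassA (if fwd then nodes else nodes.reverse) label
    if p.2 then pvPropLoop nodes f (!fwd) p.1 else p.1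

def pvFuelB (g : List (List String)) : Nat :=
  (g.length * (PySem.List.pyGetD g 0 []).length) *
    (g.length * (PySem.List.pyGetD g 0 []).length) + 1

/-- B's `component(seed, key)` (the Python memo cache caches a pure function of `key`
    and is dropped; `comps` is the grouping of nodes by their final label). -/
def pvComponent (g : List (List String)) (seed : PVCell) (key : Option String) :
    PySem.Set PVCell :=
  let nodes := match key with
    | none => pvWilds g
    | some s => (pvBySym g).getD s [] ++ pvWilds g
  let label0 := nodes.foldl (fun d c => d.insert c c) PySem.Dict.empty
  let label := pvPropLoop nodes (pvFuelB g) true label0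
  let comps := nodes.foldl (fun d c => d.modify (label.getD c c) [] (· ++ [c]))
    PySem.Dict.empty
  comps.getD (label.getD seed seed) []

/-- B's `interior` boundary test. -/
def pvInterior (g : List (List String)) (cell : PVCell) : Bool :=
  (pvNbrs cell).all fun nb =>
    !(decide (0 ≤ nb.1 ∧ nb.1 < pvR g ∧ 0 ≤ nb.2 ∧ nb.2 < pvC g)) ||
      (pvGet g nb.1 nb.2 == "WD") || decide (pvGet g nb.1 nb.2 ∈ pvNC)

/-- B's shared record step: update covered, append (size, symbol). -/
def pvRecord (p : PySem.Set PVCell × List (Int × String)) (cells : PySem.Set PVCell)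
    (symbol : String) : PySem.Set PVCell × List (Int × String) :=
  if 4 ≤ cells.length then
    (PySem.Set.update p.1 cells, p.2 ++ [((cells.length : Int), symbol)])
  else p

def pvStepB (g : List (List String)) (phase : Int)
    (p : PySem.Set PVCell × List (Int × String)) (i j : Int) :
    PySem.Set PVCell × List (Int × String) :=
  if (i, j) ∈ p.1 then p
  else
    let symbol := pvGet g i j
    if phase = 1 then
      if symbol ∈ pvNC ∨ symbol = "WD" then p
      else pvRecord p (pvComponent g (i, j) (some symbol)) symbol
    else
      if symbol ≠ "WD" then p
      else
        pvRecord p ((pvComponent g (i, j) none).filter (pvInterior g)) symbol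

def count_clusters_alt (grid : List (List String)) : Int × (List (Int × String)) :=
  let p := ([1, 2] : List Int).foldl (fun p phase =>
    (PySem.List.pyRange 0 (pvR grid) 1).foldl (fun p i =>
      (PySem.List.pyRange 0 (pvC grid) 1).foldl (fun p j => pvStepB grid phase p i j) p) p)
    ([], [])
  (PySem.List.len p.2, p.2)

-- ===== PRECONDITION & SPEC =====
-- Pre_ excludes exactly the inputs on which A raises: grids with a row shorter than
-- row 0 (grid[i][j] / grid[nx][ny] IndexErrors).
def Pre_count_clusters (grid : List (List String)) : Prop :=
  ∀ row ∈ grid, (PySem.List.pyGetD grid 0 []).length ≤ row.length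
instance (grid : List (List String)) : Decidable (Pre_count_clusters grid) := by
  unfold Pre_count_clusters; infer_instance

def pvWitness_count_clusters : List (List String) :=
  [["AA", "AA"], ["AA", "AA"]]

def Spec_count_clusters (grid : List (List String)) (out : Int × (List (Int × String))) : Prop :=
  out = count_clusters_alt grid
instance (grid : List (List String)) (out : Int × (List (Int × String))) :
    Decidable (Spec_count_clusters grid out) := by unfold Spec_count_clusters; infer_instance

-- ===== CLAIM (what is proved, stated in full; the proofs are below) =====
def Claim_equal_count_clusters : Prop := ∀ (grid : List (List String)),
  Dom_count_clusters grid → Pre_count_clusters grid →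
    Spec_count_clusters grid (count_clusters grid)

-- ===== LEMMAS AND PROOFS =====

-- in-bounds + symbol condition of A's phase-1 dfs pushes (flat, matching the port's condition)
abbrev pvOk1 (g : List (List String)) (symbol : String) (nb : PVCell) : Prop :=
  0 ≤ nb.1 ∧ nb.1 < pvR g ∧ 0 ≤ nb.2 ∧ nb.2 < pvC g ∧ pvGet g nb.1 nb.2 ∉ pvNC ∧
    (pvGet g nb.1 nb.2 = symbol ∨ pvGet g nb.1 nb.2 = "WD")

-- wild condition (without the visited test)
abbrev pvOkW (g : List (List String)) (nb : PVCell) : Prop :=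
  0 ≤ nb.1 ∧ nb.1 < pvR g ∧ 0 ≤ nb.2 ∧ nb.2 < pvC g ∧ pvGet g nb.1 nb.2 = "WD"

def pvReach (P : PVCell → Prop) (s t : PVCell) : Prop :=
  Relation.ReflTransGen (fun a b => b ∈ pvNbrs a ∧ P b) s t

/-- proof-side skeleton of A's while-loops, tracking visited only -/
def gVisit (push : PVCell → PySem.Set PVCell → Prop) [∀ c s, Decidable (push c s)] :
    Nat → List PVCell → PySem.Set PVCell → PySem.Set PVCell
  | 0, _, v => v
  | _ + 1, [], v => v
  | f + 1, x :: st, v =>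
    if x ∈ v then gVisit push f st v
    else
      gVisit push f
        (pvDirs.foldl (fun s d =>
          if push (x.1 + d.1, x.2 + d.2) (PySem.Set.add v x) then (x.1 + d.1, x.2 + d.2) :: s
          else s) st)
        (PySem.Set.add v x)

lemma pvMem_foldl_push {α : Type} (ds : List α) (f : α → PVCell) (cond : α → Prop)
    [DecidablePred cond] (st : List PVCell) (b : PVCell) :
    b ∈ ds.foldl (fun s d => if cond d then f d :: s else s) st ↔
      b ∈ st ∨ ∃ d ∈ ds, cond d ∧ b = f d := by
  induction ds generalizing st with
  | nil => simp
  | cons d ds ih =>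
    simp only [List.foldl_cons]
    rw [ih]
    by_cases h : cond d
    · simp [h]
      tauto
    · simp [h]

lemma pvLength_foldl_push {α : Type} (ds : List α) (f : α → PVCell) (cond : α → Prop)
    [DecidablePred cond] (st : List PVCell) :
    (ds.foldl (fun s d => if cond d then f d :: s else s) st).length ≤ st.length + ds.length := by
  induction ds generalizing st with
  | nil => simp
  | cons d ds ih =>
    simp only [List.foldl_cons]
    by_cases h : cond d
    · rw [if_pos h]
      have h2 := ih (f d :: st)
      simp only [List.length_cons] at h2 ⊢
      omega
    · rw [if_neg h]
      have h2 := ih st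
      simp only [List.length_cons]
      omega

lemma pvMem_nbrs_iff (b x : PVCell) :
    b ∈ pvNbrs x ↔ ∃ d ∈ pvDirs, b = (x.1 + d.1, x.2 + d.2) := by
  simp [pvNbrs, pvDirs, sub_eq_add_neg]

lemma pvGVisit_mono (push : PVCell → PySem.Set PVCell → Prop) [∀ c s, Decidable (push c s)] :
    ∀ (f : Nat) (st : List PVCell) (v : PySem.Set PVCell) (a : PVCell),
      a ∈ v → a ∈ gVisit push f st v := by
  intro f
  induction f with
  | zero => intro st v a ha; simpa [gVisit] using ha
  | succ f ih =>
    intro st v a ha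
    cases st with
    | nil => simpa [gVisit] using ha
    | cons x st =>
      by_cases hx : x ∈ v
      · simpa [gVisit, hx] using ih st v a ha
      · simp only [gVisit, if_neg hx]
        exact ih _ _ a (by simp [PySem.Set.mem_add, ha])

lemma pvGVisit_sub (push : PVCell → PySem.Set PVCell → Prop) [∀ c s, Decidable (push c s)]
    (P : PVCell → Prop) (hpush1 : ∀ nb v', push nb v' → P nb) (T : PVCell → Prop)
    (hcl : ∀ a b, T a → b ∈ pvNbrs a → P b → T b) :
    ∀ (f : Nat) (st : List PVCell) (v : PySem.Set PVCell),
      (∀ c ∈ st, T c) → (∀ c ∈ v, T c) → ∀ a ∈ gVisit push f st v, T a := by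
  intro f
  induction f with
  | zero => intro st v _ hv a ha; exact hv a (by simpa [gVisit] using ha)
  | succ f ih =>
    intro st v hst hv a ha
    cases st with
    | nil => exact hv a (by simpa [gVisit] using ha)
    | cons x st =>
      by_cases hx : x ∈ v
      · exact ih st v (fun c hc => hst c (List.mem_cons_of_mem _ hc)) hv a
          (by simpa [gVisit, hx] using ha)
      · simp only [gVisit, if_neg hx] at ha
        refine ih _ _ ?_ ?_ a ha
        · intro c hc
          rw [pvMem_foldl_push] at hc
          rcases hc with hc | ⟨d, hd, hcond, rfl⟩
          · exact hst c (List.mem_cons_of_mem _ hc)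
          · exact hcl x _ (hst x List.mem_cons_self) ((pvMem_nbrs_iff _ _).2 ⟨d, hd, rfl⟩)
              (hpush1 _ _ hcond)
        · intro c hc
          rw [PySem.Set.mem_add] at hc
          rcases hc with hc | rfl
          · exact hv c hc
          · exact hst c List.mem_cons_self

lemma pvGVisit_main (push : PVCell → PySem.Set PVCell → Prop) [∀ c s, Decidable (push c s)]
    (P : PVCell → Prop) [DecidablePred P] (U : Finset PVCell)
    (hpush1 : ∀ nb v', push nb v' → P nb)
    (hpush2 : ∀ nb v', P nb → nb ∉ v' → push nb v')
    (hPU : ∀ c, P c → c ∈ U) :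
    ∀ (f : Nat) (st : List PVCell) (v : PySem.Set PVCell),
      5 * (U.filter (fun c => P c ∧ c ∉ v)).card + st.length + 1 ≤ f →
      (∀ c ∈ st, P c) → v.Nodup →
      (gVisit push f st v).Nodup ∧ (∀ c ∈ st, c ∈ gVisit push f st v) ∧
      ((∀ a ∈ v, ∀ b ∈ pvNbrs a, P b → b ∈ v ∨ b ∈ st) →
        ∀ a ∈ gVisit push f st v, ∀ b ∈ pvNbrs a, P b → b ∈ gVisit push f st v) := by
  intro f
  induction f with
  | zero => intro st v hf; omega
  | succ f ih =>
    intro st v hf hstP hnd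
    cases st with
    | nil =>
      refine ⟨by simpa [gVisit] using hnd, by simp, ?_⟩
      intro hinv a ha b hb hPb
      simp only [gVisit] at ha ⊢
      rcases hinv a ha b hb hPb with h | h
      · exact h
      · simp at h
    | cons x st =>
      by_cases hx : x ∈ v
      · have hm : 5 * (U.filter (fun c => P c ∧ c ∉ v)).card + st.length + 1 ≤ f := by
          simp only [List.length_cons] at hf; omega
        obtain ⟨ihnd, ihst, ihcl⟩ := ih st v hm (fun c hc => hstP c (List.mem_cons_of_mem _ hc)) hnd
        simp only [gVisit, if_pos hx]
        refine ⟨ihnd, ?_, ?_⟩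
        · intro c hc
          rcases List.mem_cons.1 hc with rfl | hc
          · exact pvGVisit_mono push f st v c hx
          · exact ihst c hc
        · intro hinv
          refine ihcl ?_
          intro a ha b hb hPb
          rcases hinv a ha b hb hPb with h | h
          · exact Or.inl h
          · rcases List.mem_cons.1 h with rfl | h
            · exact Or.inl hx
            · exact Or.inr h
      · -- new cell
        have hPx : P x := hstP x List.mem_cons_self
        have hvadd : PySem.Set.add v x = v ++ [x] := PySem.Set.add_of_not_mem hx
        have hmemadd : ∀ c, c ∈ PySem.Set.add v x ↔ c ∈ v ∨ c = x := by
          intro c; rw [hvadd]; simp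
        -- card decreases
        have hxfil : x ∈ U.filter (fun c => P c ∧ c ∉ v) := by
          simp only [Finset.mem_filter]; exact ⟨hPU x hPx, hPx, hx⟩
        have hfilter_eq :
            U.filter (fun c => P c ∧ c ∉ PySem.Set.add v x) =
              (U.filter (fun c => P c ∧ c ∉ v)).erase x := by
          ext c
          simp only [Finset.mem_filter, Finset.mem_erase, hmemadd c]
          tauto
        have hcard : (U.filter (fun c => P c ∧ c ∉ PySem.Set.add v x)).card + 1 =
            (U.filter (fun c => P c ∧ c ∉ v)).card := by
          rw [hfilter_eq, Finset.card_erase_of_mem hxfil]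
          have := Finset.card_pos.2 ⟨x, hxfil⟩
          omega
        have hstlen : (pvDirs.foldl (fun s d =>
            if push (x.1 + d.1, x.2 + d.2) (PySem.Set.add v x) then (x.1 + d.1, x.2 + d.2) :: s
            else s) st).length ≤ st.length + pvDirs.length :=
          pvLength_foldl_push _ _ _ _
        have hm : 5 * (U.filter (fun c => P c ∧ c ∉ PySem.Set.add v x)).card +
            (pvDirs.foldl (fun s d =>
              if push (x.1 + d.1, x.2 + d.2) (PySem.Set.add v x) then (x.1 + d.1, x.2 + d.2) :: s
              else s) st).length + 1 ≤ f := by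
          simp only [List.length_cons] at hf
          have : pvDirs.length = 4 := rfl
          omega
        have hstP' : ∀ c ∈ (pvDirs.foldl (fun s d =>
            if push (x.1 + d.1, x.2 + d.2) (PySem.Set.add v x) then (x.1 + d.1, x.2 + d.2) :: s
            else s) st), P c := by
          intro c hc
          rw [pvMem_foldl_push] at hc
          rcases hc with hc | ⟨d, _, hcond, rfl⟩
          · exact hstP c (List.mem_cons_of_mem _ hc)
          · exact hpush1 _ _ hcond
        have hnd' : (PySem.Set.add v x).Nodup := by
          rw [hvadd]
          refine hnd.append (List.nodup_singleton x) ?_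
          intro a ha hb
          rw [List.mem_singleton] at hb
          subst hb
          exact hx ha
        obtain ⟨ihnd, ihst, ihcl⟩ := ih _ _ hm hstP' hnd'
        simp only [gVisit, if_neg hx]
        refine ⟨ihnd, ?_, ?_⟩
        · intro c hc
          rcases List.mem_cons.1 hc with rfl | hc
          · exact pvGVisit_mono push f _ _ c ((hmemadd c).2 (Or.inr rfl))
          · exact ihst c (by rw [pvMem_foldl_push]; exact Or.inl hc)
        · intro hinv
          refine ihcl ?_
          intro a ha b hb hPb
          rcases (hmemadd a).1 ha with ha' | rfl
          · rcases hinv a ha' b hb hPb with h | h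
            · exact Or.inl ((hmemadd b).2 (Or.inl h))
            · rcases List.mem_cons.1 h with rfl | h
              · exact Or.inl ((hmemadd b).2 (Or.inr rfl))
              · exact Or.inr (by rw [pvMem_foldl_push]; exact Or.inl h)
          · by_cases hbv : b ∈ PySem.Set.add v a
            · exact Or.inl hbv
            · have hpb := hpush2 b _ hPb hbv
              rcases (pvMem_nbrs_iff b a).1 hb with ⟨d, hd, rfl⟩
              exact Or.inr (by rw [pvMem_foldl_push]; exact Or.inr ⟨d, hd, hpb, rfl⟩)

lemma pvGVisit_char (push : PVCell → PySem.Set PVCell → Prop) [∀ c s, Decidable (push c s)]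
    (P : PVCell → Prop) [DecidablePred P] (U : Finset PVCell)
    (hpush1 : ∀ nb v', push nb v' → P nb)
    (hpush2 : ∀ nb v', P nb → nb ∉ v' → push nb v')
    (hPU : ∀ c, P c → c ∈ U) (s : PVCell) (hPs : P s) (f : Nat)
    (hf : 5 * (U.filter (fun c => P c)).card + 2 ≤ f) :
    (gVisit push f [s] []).Nodup ∧ (∀ x, x ∈ gVisit push f [s] [] ↔ pvReach P s x) := by
  have hfil : (U.filter (fun c => P c ∧ c ∉ ([] : PySem.Set PVCell))) = U.filter (fun c => P c) := by
    apply Finset.filter_congr; intro c _; simp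
  obtain ⟨hnd, hst, hcl⟩ := pvGVisit_main push P U hpush1 hpush2 hPU f [s] []
    (by rw [hfil]; simpa using hf) (by simpa using hPs) List.nodup_nil
  refine ⟨hnd, fun x => ⟨?_, ?_⟩⟩
  · intro hx
    refine pvGVisit_sub push P hpush1 (pvReach P s) ?_ f [s] [] ?_ (by simp) x hx
    · intro a b ha hb hPb
      exact Relation.ReflTransGen.tail ha ⟨hb, hPb⟩
    · intro c hc
      rcases List.mem_singleton.1 hc with rfl
      exact Relation.ReflTransGen.refl
  · intro hx
    induction hx with
    | refl => exact hst s (by simp)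
    | tail hab hbc ihx =>
      exact hcl (by intro a ha; simp at ha) _ ihx _ hbc.1 hbc.2

-- bridge: A's dfs loop tracks (visited, cluster) with cluster = visited
lemma pvDfsLoop_fst (g : List (List String)) (symbol : String) :
    ∀ (f : Nat) (st : List PVCell) (v c : PySem.Set PVCell),
      (dfsLoop g symbol f st v c).1 = gVisit (fun nb _ => pvOk1 g symbol nb) f st v := by
  intro f
  induction f with
  | zero => intro st v c; rfl
  | succ f ih =>
    intro st v c
    cases st with
    | nil => rfl
    | cons hd st =>
      obtain ⟨x, y⟩ := hd
      by_cases hx : (x, y) ∈ v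
      · simp only [dfsLoop, gVisit, if_pos hx]; exact ih st v c
      · simp only [dfsLoop, gVisit, if_neg hx]; exact ih _ _ _

lemma pvDfsLoop_snd (g : List (List String)) (symbol : String) :
    ∀ (f : Nat) (st : List PVCell) (v : PySem.Set PVCell),
      (dfsLoop g symbol f st v v).2 = (dfsLoop g symbol f st v v).1 := by
  intro f
  induction f with
  | zero => intro st v; rfl
  | succ f ih =>
    intro st v
    cases st with
    | nil => rfl
    | cons hd st =>
      obtain ⟨x, y⟩ := hd
      by_cases hx : (x, y) ∈ v
      · simp only [dfsLoop, if_pos hx]; exact ih st v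
      · simp only [dfsLoop, if_neg hx]; exact ih _ _

-- bridge: A's wild loop; cluster stays the pvKeep-filter of visited
abbrev pvPushW (g : List (List String)) (nb : PVCell) (v' : PySem.Set PVCell) : Prop :=
  (0 ≤ nb.1 ∧ nb.1 < pvR g ∧ 0 ≤ nb.2 ∧ nb.2 < pvC g ∧ nb ∉ v') ∧ pvGet g nb.1 nb.2 = "WD"

lemma pvWildLoop_fst (g : List (List String)) :
    ∀ (f : Nat) (st : List PVCell) (v c : PySem.Set PVCell),
      (wildLoop g f st v c).1 = gVisit (pvPushW g) f st v := by
  intro f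
  induction f with
  | zero => intro st v c; rfl
  | succ f ih =>
    intro st v c
    cases st with
    | nil => rfl
    | cons hd st =>
      obtain ⟨x, y⟩ := hd
      by_cases hx : (x, y) ∈ v
      · simp only [wildLoop, gVisit, if_pos hx]; exact ih st v c
      · simp only [wildLoop, gVisit, if_neg hx]; exact ih _ _ _

lemma pvWildLoop_snd (g : List (List String)) :
    ∀ (f : Nat) (st : List PVCell) (v c : PySem.Set PVCell), c = v.filter (pvKeep g) →
      (wildLoop g f st v c).2 = ((wildLoop g f st v c).1).filter (pvKeep g) := by
  intro f
  induction f with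
  | zero => intro st v c hc; simpa [wildLoop] using hc
  | succ f ih =>
    intro st v c hc
    cases st with
    | nil => simpa [wildLoop] using hc
    | cons hd st =>
      obtain ⟨x, y⟩ := hd
      by_cases hx : (x, y) ∈ v
      · simp only [wildLoop, if_pos hx]; exact ih st v c hc
      · simp only [wildLoop, if_neg hx]
        refine ih _ _ _ ?_
        have hxc : (x, y) ∉ c := by
          subst hc; intro h; exact hx (List.mem_of_mem_filter h)
        rw [PySem.Set.add_of_not_mem hx, PySem.Set.add_of_not_mem hxc, hc]
        rw [List.filter_append, List.filter_append, List.filter_filter]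
        simp

-- bounded universe of grid cells
noncomputable def pvCellsF (g : List (List String)) : Finset PVCell :=
  Finset.Icc (0 : Int) (pvR g - 1) ×ˢ Finset.Icc (0 : Int) (pvC g - 1)

lemma pvCellsF_card (g : List (List String)) :
    (pvCellsF g).card = g.length * (PySem.List.pyGetD g 0 []).length := by
  rw [pvCellsF, Finset.card_product, Int.card_Icc, Int.card_Icc]
  have h1 : pvR g = (g.length : Int) := by simp [pvR, PySem.List.len_eq]
  have h2 : pvC g = (((PySem.List.pyGetD g 0 []).length : Nat) : Int) := by
    simp [pvC, PySem.List.len_eq]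
  rw [h1, h2]
  simp

lemma pvMem_cellsF (g : List (List String)) (c : PVCell)
    (h : 0 ≤ c.1 ∧ c.1 < pvR g ∧ 0 ≤ c.2 ∧ c.2 < pvC g) : c ∈ pvCellsF g := by
  rw [pvCellsF, Finset.mem_product, Finset.mem_Icc, Finset.mem_Icc]
  omega

lemma pvFuelA_ok (g : List (List String)) (P : PVCell → Prop) [DecidablePred P] :
    5 * ((pvCellsF g).filter (fun c => P c)).card + 2 ≤ pvFuelA g := by
  have h := Finset.card_filter_le (pvCellsF g) (fun c => P c)
  rw [pvCellsF_card] at h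
  unfold pvFuelA
  omega

/-- A's dfs cluster set (before the ≥4 gate) is exactly the pvOk1-reachable set. -/
lemma pvDfs_char (g : List (List String)) (i j : Int)
    (hin : 0 ≤ i ∧ i < pvR g ∧ 0 ≤ j ∧ j < pvC g)
    (hnc : pvGet g i j ∉ pvNC) (_hwd : pvGet g i j ≠ "WD") :
    (dfsLoop g (pvGet g i j) (pvFuelA g) [(i, j)] [] []).2.Nodup ∧
      ∀ x, x ∈ (dfsLoop g (pvGet g i j) (pvFuelA g) [(i, j)] [] []).2 ↔
        pvReach (pvOk1 g (pvGet g i j)) (i, j) x := by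
  rw [pvDfsLoop_snd, pvDfsLoop_fst]
  exact pvGVisit_char (fun nb _ => pvOk1 g (pvGet g i j) nb) (pvOk1 g (pvGet g i j))
    (pvCellsF g) (fun nb v' h => h) (fun nb v' h _ => h)
    (fun c hc => pvMem_cellsF g c ⟨hc.1, hc.2.1, hc.2.2.1, hc.2.2.2.1⟩)
    (i, j) ⟨hin.1, hin.2.1, hin.2.2.1, hin.2.2.2, hnc, Or.inl rfl⟩
    (pvFuelA g) (pvFuelA_ok g _)

/-- A's dfs_wild visited set is exactly the pvOkW-reachable set, and its cluster its filter. -/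
lemma pvWild_char (g : List (List String)) (i j : Int)
    (hin : 0 ≤ i ∧ i < pvR g ∧ 0 ≤ j ∧ j < pvC g)
    (hwd : pvGet g i j = "WD") :
    (wildLoop g (pvFuelA g) [(i, j)] [] []).2 =
        ((wildLoop g (pvFuelA g) [(i, j)] [] []).1).filter (pvKeep g) ∧
      (wildLoop g (pvFuelA g) [(i, j)] [] []).1.Nodup ∧
      ∀ x, x ∈ (wildLoop g (pvFuelA g) [(i, j)] [] []).1 ↔
        pvReach (pvOkW g) (i, j) x := by
  refine ⟨pvWildLoop_snd g _ _ _ _ rfl, ?_⟩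
  rw [pvWildLoop_fst]
  exact pvGVisit_char (pvPushW g) (pvOkW g) (pvCellsF g)
    (fun nb v' h => by tauto)
    (fun nb v' h hnv => by tauto)
    (fun c hc => pvMem_cellsF g c ⟨hc.1, hc.2.1, hc.2.2.1, hc.2.2.2.1⟩)
    (i, j) ⟨hin.1, hin.2.1, hin.2.2.1, hin.2.2.2, hwd⟩
    (pvFuelA g) (pvFuelA_ok g _)

-- ===== B-side: min-label propagation =====
abbrev pvPB (g : List (List String)) (ok : String → Bool) (c : PVCell) : Prop :=
  0 ≤ c.1 ∧ c.1 < pvR g ∧ 0 ≤ c.2 ∧ c.2 < pvC g ∧ ok (pvGet g c.1 c.2) = true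

-- the lex order pvLtB
lemma pvLtB_iff (a b : PVCell) :
    pvLtB a b = true ↔ (a.1 < b.1 ∨ (a.1 = b.1 ∧ a.2 < b.2)) := by
  simp [pvLtB]

lemma pvLtB_irrefl (a : PVCell) : pvLtB a a = false := by
  simp [pvLtB]

lemma pvLtB_antisymm {a b : PVCell} (h1 : pvLtB a b = false) (h2 : pvLtB b a = false) :
    a = b := by
  obtain ⟨a1, a2⟩ := a; obtain ⟨b1, b2⟩ := b
  simp only [pvLtB] at h1 h2
  simp only [Bool.or_eq_false_iff, Bool.and_eq_false_iff, decide_eq_false_iff_not,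
    Prod.mk.injEq] at h1 h2 ⊢
  constructor <;> omega

lemma pvLtB_total {a b : PVCell} (h : a ≠ b) : pvLtB a b = true ∨ pvLtB b a = true := by
  by_cases h1 : pvLtB a b = true
  · exact Or.inl h1
  · by_cases h2 : pvLtB b a = true
    · exact Or.inr h2
    · exact absurd (pvLtB_antisymm (Bool.eq_false_iff.2 h1) (Bool.eq_false_iff.2 h2)) h

-- Le x y := pvLtB y x = false  ("x ≤ y")
lemma pvLe_trans {x y z : PVCell} (h1 : pvLtB y x = false) (h2 : pvLtB z y = false) :
    pvLtB z x = false := by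
  obtain ⟨x1, x2⟩ := x; obtain ⟨y1, y2⟩ := y; obtain ⟨z1, z2⟩ := z
  simp only [pvLtB, Bool.or_eq_false_iff, Bool.and_eq_false_iff, decide_eq_false_iff_not] at *
  omega

def pvFoldStep (d : PySem.Dict PVCell PVCell) (m nb : PVCell) : PVCell :=
  match d.get? nb with
  | some v => if pvLtB v m then v else m
  | none => m

lemma pvMinLabel_eq_fold (d : PySem.Dict PVCell PVCell) (c : PVCell) :
    pvMinLabel d c = (pvNbrs c).foldl (pvFoldStep d) (d.getD c c) := rfl

lemma pvLtB_asymm {a b : PVCell} (h : pvLtB a b = true) : pvLtB b a = false := by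
  obtain ⟨a1, a2⟩ := a; obtain ⟨b1, b2⟩ := b
  simp only [pvLtB, Bool.or_eq_true, Bool.and_eq_true, decide_eq_true_eq,
    Bool.or_eq_false_iff, Bool.and_eq_false_iff, decide_eq_false_iff_not] at h ⊢
  omega

lemma pvFoldStep_le (d : PySem.Dict PVCell PVCell) (m nb : PVCell) :
    pvLtB m (pvFoldStep d m nb) = false := by
  unfold pvFoldStep
  cases h : d.get? nb with
  | none => simp [pvLtB_irrefl]
  | some v =>
    by_cases hv : pvLtB v m = true
    · simp [hv, pvLtB_asymm hv]
    · simp [hv, pvLtB_irrefl]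

lemma pvFold_le (d : PySem.Dict PVCell PVCell) (L : List PVCell) :
    ∀ m, pvLtB m (L.foldl (pvFoldStep d) m) = false := by
  induction L with
  | nil => intro m; exact pvLtB_irrefl m
  | cons nb t ih =>
    intro m
    simp only [List.foldl_cons]
    exact pvLe_trans (ih (pvFoldStep d m nb)) (pvFoldStep_le d m nb)

lemma pvFold_le_mem (d : PySem.Dict PVCell PVCell) (L : List PVCell) :
    ∀ m nb v, nb ∈ L → d.get? nb = some v →
      pvLtB v (L.foldl (pvFoldStep d) m) = false := by
  induction L with
  | nil => intro m nb v h; simp at h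
  | cons a t ih =>
    intro m nb v hnb hv
    simp only [List.foldl_cons]
    rcases List.mem_cons.1 hnb with rfl | hnb
    · -- first step already brings the value to ≤ v
      have hstep : pvLtB v (pvFoldStep d m nb) = false := by
        unfold pvFoldStep
        rw [hv]
        show pvLtB v (if pvLtB v m = true then v else m) = false
        by_cases h : pvLtB v m = true
        · rw [if_pos h]; exact pvLtB_irrefl v
        · rw [if_neg h]; exact Bool.eq_false_iff.2 h
      exact pvLe_trans (pvFold_le d t (pvFoldStep d m nb)) hstep
    · exact ih _ nb v hnb hv

lemma pvFold_mem (d : PySem.Dict PVCell PVCell) (L : List PVCell) :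
    ∀ m, L.foldl (pvFoldStep d) m = m ∨
      ∃ nb ∈ L, d.get? nb = some (L.foldl (pvFoldStep d) m) := by
  induction L with
  | nil => intro m; exact Or.inl rfl
  | cons a t ih =>
    intro m
    simp only [List.foldl_cons]
    rcases ih (pvFoldStep d m a) with h | ⟨nb, hnb, hsome⟩
    · cases hv : d.get? a with
      | none =>
        left
        rw [h]
        simp [pvFoldStep, hv]
      | some v =>
        by_cases hlt : pvLtB v m = true
        · right
          exact ⟨a, List.mem_cons_self, by rw [h]; simp [pvFoldStep, hv, hlt]⟩
        · left
          rw [h]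
          simp [pvFoldStep, hv, hlt]
    · exact Or.inr ⟨nb, List.mem_cons_of_mem _ hnb, hsome⟩

-- dict representation: items = nodes.map (c ↦ (c, F c))
def pvRep (nodes : List PVCell) (d : PySem.Dict PVCell PVCell) (F : PVCell → PVCell) : Prop :=
  d.items = nodes.map fun c => (c, F c)

lemma pvRep_keys {nodes : List PVCell} {d : PySem.Dict PVCell PVCell} {F : PVCell → PVCell}
    (h : pvRep nodes d F) : d.keys = nodes := by
  have h' : d.items = nodes.map fun c => (c, F c) := h
  show d.items.map (·.1) = nodes
  rw [h', List.map_map]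
  exact List.map_id' nodes

lemma pvRep_get? {nodes : List PVCell} {d : PySem.Dict PVCell PVCell} {F : PVCell → PVCell}
    (hnd : nodes.Nodup) (h : pvRep nodes d F)
    {c : PVCell} (hc : c ∈ nodes) : d.get? c = some (F c) := by
  have h' : d.items = nodes.map fun c => (c, F c) := h
  have h1 : (c, F c) ∈ d.items := by rw [h']; exact List.mem_map.2 ⟨c, hc, rfl⟩
  have h2 : d.keys.Nodup := by rw [pvRep_keys h]; exact hnd
  exact PySem.Dict.get?_of_mem_items d h1 h2

lemma pvRep_getD {nodes : List PVCell} {d : PySem.Dict PVCell PVCell} {F : PVCell → PVCell}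
    (hnd : nodes.Nodup) (h : pvRep nodes d F)
    {c : PVCell} (hc : c ∈ nodes) (dflt : PVCell) : d.getD c dflt = F c :=
  PySem.Dict.getD_of_get?_eq_some d dflt (pvRep_get? hnd h hc)

lemma pvRep_get?_inv {nodes : List PVCell} {d : PySem.Dict PVCell PVCell} {F : PVCell → PVCell}
    (h : pvRep nodes d F)
    {nb v : PVCell} (hv : d.get? nb = some v) : nb ∈ nodes ∧ v = F nb := by
  have h' : d.items = nodes.map fun c => (c, F c) := h
  have hmem : (nb, v) ∈ d.items := PySem.Dict.mem_items_of_get?_eq_some d hv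
  rw [h'] at hmem
  obtain ⟨c, hc, heq⟩ := List.mem_map.1 hmem
  obtain ⟨h1, h2⟩ := Prod.mk.injEq .. ▸ heq
  exact ⟨h1 ▸ hc, h2.symm ▸ (by rw [← h1])⟩

-- Nat index measure
def pvIdx (g : List (List String)) (c : PVCell) : Nat := (c.1 * pvC g + c.2).toNat

lemma pvIdx_lt (g : List (List String)) {a b : PVCell}
    (ha : 0 ≤ a.1 ∧ a.1 < pvR g ∧ 0 ≤ a.2 ∧ a.2 < pvC g)
    (hb : 0 ≤ b.1 ∧ b.1 < pvR g ∧ 0 ≤ b.2 ∧ b.2 < pvC g)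
    (hlt : pvLtB a b = true) : pvIdx g a < pvIdx g b := by
  rw [pvLtB_iff] at hlt
  unfold pvIdx
  obtain ⟨ha1, ha2, ha3, ha4⟩ := ha
  obtain ⟨hb1, hb2, hb3, hb4⟩ := hb
  rcases hlt with h | ⟨h1, h2⟩
  · have hmul : (a.1 + 1) * pvC g ≤ b.1 * pvC g :=
      mul_le_mul_of_nonneg_right (by omega) (by omega)
    have h1 : a.1 * pvC g + a.2 < b.1 * pvC g + b.2 := by
      have : (a.1 + 1) * pvC g = a.1 * pvC g + pvC g := by ring
      omega
    have h2 : 0 ≤ a.1 * pvC g := mul_nonneg ha1 (by omega)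
    have h3 : 0 ≤ b.1 * pvC g := mul_nonneg hb1 (by omega)
    omega
  · rw [h1]
    have h2' : b.1 * pvC g + a.2 < b.1 * pvC g + b.2 := by omega
    have h3 : 0 ≤ b.1 * pvC g := mul_nonneg hb1 (by omega)
    omega

lemma pvIdx_bound (g : List (List String)) {c : PVCell}
    (hc : 0 ≤ c.1 ∧ c.1 < pvR g ∧ 0 ≤ c.2 ∧ c.2 < pvC g) :
    pvIdx g c ≤ g.length * (PySem.List.pyGetD g 0 []).length := by
  unfold pvIdx
  obtain ⟨h1, h2, h3, h4⟩ := hc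
  have hR : pvR g = (g.length : Int) := by simp [pvR, PySem.List.len_eq]
  have hC : pvC g = (((PySem.List.pyGetD g 0 []).length : Nat) : Int) := by
    simp [pvC, PySem.List.len_eq]
  have hmul : (c.1 + 1) * pvC g ≤ (g.length : Int) * pvC g :=
    mul_le_mul_of_nonneg_right (by omega) (by omega)
  have hexp : (c.1 + 1) * pvC g = c.1 * pvC g + pvC g := by ring
  have h5 : c.1 * pvC g + c.2 < (g.length : Int) * pvC g := by omega
  have h6 : ((g.length : Int)) * pvC g =
      ((g.length * (PySem.List.pyGetD g 0 []).length : Nat) : Int) := by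
    rw [hC]; push_cast; ring
  omega

def pvMeasure (g : List (List String)) (nodes : List PVCell) (F : PVCell → PVCell) : Nat :=
  (nodes.map fun c => pvIdx g (F c)).sum

lemma pvSum_lt {l : List PVCell} {f gg : PVCell → Nat}
    (hle : ∀ c ∈ l, f c ≤ gg c) (hex : ∃ c ∈ l, f c < gg c) :
    (l.map f).sum < (l.map gg).sum :=
  List.sum_lt_sum f gg hle hex

-- nodes facts
lemma pvMem_cellsList (g : List (List String)) (c : PVCell) :
    c ∈ pvCellsList g ↔ 0 ≤ c.1 ∧ c.1 < pvR g ∧ 0 ≤ c.2 ∧ c.2 < pvC g := by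
  obtain ⟨x, y⟩ := c
  simp only [pvCellsList, List.mem_flatMap, List.mem_map, PySem.List.mem_pyRange_one,
    Prod.mk.injEq]
  constructor
  · rintro ⟨i, hi, j, hj, rfl, rfl⟩
    exact ⟨hi.1, hi.2, hj.1, hj.2⟩
  · rintro ⟨h1, h2, h3, h4⟩
    exact ⟨x, ⟨h1, h2⟩, y, ⟨h3, h4⟩, rfl, rfl⟩

lemma pvCellsList_nodup (g : List (List String)) : (pvCellsList g).Nodup := by
  unfold pvCellsList
  rw [List.nodup_flatMap]
  constructor
  · intro i _
    exact (PySem.List.nodup_pyRange_one _ _).map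
      (fun a b h => by simpa using (Prod.mk.injEq .. ▸ h).2)
  · refine List.Pairwise.imp ?_
      ((PySem.List.nodup_pyRange_one (0 : Int) (pvR g)).pairwise_of_forall_ne
        (r := fun i i' => i ≠ i') (fun a _ b _ hab => hab))
    intro i i' hne
    intro x hx hx'
    simp only [List.mem_map] at hx hx'
    obtain ⟨j, _, rfl⟩ := hx
    obtain ⟨j', _, h⟩ := hx'
    exact hne ((Prod.mk.injEq .. ▸ h).1).symm

lemma pvCellsList_len (g : List (List String)) :
    (pvCellsList g).length = g.length * (PySem.List.pyGetD g 0 []).length := by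
  unfold pvCellsList
  rw [List.length_flatMap]
  have hlen : ∀ i ∈ PySem.List.pyRange 0 (pvR g) 1,
      (((PySem.List.pyRange 0 (pvC g) 1).map fun j => ((i, j) : PVCell))).length =
        (PySem.List.pyGetD g 0 []).length := by
    intro i _
    rw [List.length_map, PySem.List.length_pyRange_one]
    simp [pvC, PySem.List.len_eq]
  rw [List.map_congr_left hlen, List.map_const', List.sum_replicate, smul_eq_mul,
    PySem.List.length_pyRange_one]
  simp [pvR, PySem.List.len_eq]

-- reach symmetry
lemma pvNbrs_symm {a b : PVCell} (h : b ∈ pvNbrs a) : a ∈ pvNbrs b := by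
  obtain ⟨a1, a2⟩ := a; obtain ⟨b1, b2⟩ := b
  simp only [pvNbrs, List.mem_cons, List.mem_singleton, Prod.mk.injEq,
    List.not_mem_nil, or_false] at h ⊢
  omega

lemma pvReach_last (P : PVCell → Prop) {a b : PVCell} (h : pvReach P a b) :
    b = a ∨ P b := by
  induction h with
  | refl => exact Or.inl rfl
  | tail _ hstep _ => exact Or.inr hstep.2

lemma pvReach_symm (P : PVCell → Prop) {a b : PVCell} (ha : P a) (h : pvReach P a b) :
    pvReach P b a := by
  induction h with
  | refl => exact Relation.ReflTransGen.refl
  | @tail c b hac hstep ih =>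
    have hPc : P c := (pvReach_last P hac).elim (fun e => e ▸ ha) id
    exact Relation.ReflTransGen.head ⟨pvNbrs_symm hstep.1, hPc⟩ ih


-- Rep is preserved by an in-place update at a key
lemma pvRep_insert {nodes : List PVCell} {d : PySem.Dict PVCell PVCell} {F : PVCell → PVCell}
    (h : pvRep nodes d F) {c : PVCell} (hc : c ∈ nodes) (m : PVCell) :
    pvRep nodes (d.insert c m) (fun x => if x = c then m else F x) := by
  have h' : d.items = nodes.map fun c => (c, F c) := h
  have hcont : d.contains c = true := by
    rw [PySem.Dict.contains_iff_mem_keys, pvRep_keys h]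
    exact hc
  show (d.insert c m).items = nodes.map fun x => (x, if x = c then m else F x)
  rw [PySem.Dict.items_insert_of_contains d m hcont, h', List.map_map]
  refine List.map_congr_left fun x _ => ?_
  by_cases hx : x = c
  · subst hx; simp
  · simp [hx]

-- `setdefault(k, []).append(v)` grouping loops: the bucket of s is the filter
lemma pvGroup_getD {κ : Type} [BEq κ] [LawfulBEq κ] (l : List PVCell) (k : PVCell → κ)
    (s : κ) :
    ((l.foldl (fun d c => d.modify (k c) [] (· ++ [c])) PySem.Dict.empty).getD s []) =
      l.filter (fun c => k c == s) := by
  have h1 : l.foldl (fun d c => d.modify (k c) [] (· ++ [c])) PySem.Dict.empty =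
      (l.map (fun c => (k c, c))).foldl (fun d p => d.modify p.1 [] (· ++ [p.2]))
        PySem.Dict.empty := by
    rw [List.foldl_map]
  rw [h1, PySem.Dict.getD_foldl_modify_append, PySem.Dict.getD_empty, List.filter_map,
    List.map_map]
  simp only [List.nil_append]
  have : ((fun x : κ × PVCell => x.2) ∘ fun c => (k c, c)) = fun c : PVCell => c := rfl
  rw [this, List.map_id']
  rfl

-- B's node lists
lemma pvWilds_eq (g : List (List String)) :
    pvWilds g = (pvCellsList g).filter (fun c => pvGet g c.1 c.2 == "WD") := by
  unfold pvWilds pvBySym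
  exact pvGroup_getD _ _ _

lemma pvBySym_getD (g : List (List String)) (s : String) :
    (pvBySym g).getD s [] = (pvCellsList g).filter (fun c => pvGet g c.1 c.2 == s) := by
  unfold pvBySym
  exact pvGroup_getD _ _ _

-- characterization of phase-1 node lists (s a non-wild, non-special symbol)
lemma pvNodes1_mem (g : List (List String)) (s : String) (hs1 : s ∉ pvNC) (c : PVCell) :
    c ∈ (pvBySym g).getD s [] ++ pvWilds g ↔
      pvPB g (fun x => decide (x ∉ pvNC ∧ (x = s ∨ x = "WD"))) c := by
  rw [List.mem_append, pvBySym_getD, pvWilds_eq, List.mem_filter, List.mem_filter,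
    pvMem_cellsList]
  unfold pvPB
  simp only [beq_iff_eq, decide_eq_true_eq]
  constructor
  · rintro (⟨hin, hv⟩ | ⟨hin, hv⟩)
    · exact ⟨hin.1, hin.2.1, hin.2.2.1, hin.2.2.2, hv ▸ hs1, Or.inl hv⟩
    · refine ⟨hin.1, hin.2.1, hin.2.2.1, hin.2.2.2, ?_, Or.inr hv⟩
      rw [hv]
      decide
  · rintro ⟨h1, h2, h3, h4, _, hv | hv⟩
    · exact Or.inl ⟨⟨h1, h2, h3, h4⟩, hv⟩
    · exact Or.inr ⟨⟨h1, h2, h3, h4⟩, hv⟩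

lemma pvNodes1_nodup (g : List (List String)) (s : String) (hs2 : s ≠ "WD") :
    ((pvBySym g).getD s [] ++ pvWilds g).Nodup := by
  rw [pvBySym_getD, pvWilds_eq]
  refine List.Nodup.append ((pvCellsList_nodup g).filter _)
    ((pvCellsList_nodup g).filter _) ?_
  intro c hc hc'
  rw [List.mem_filter] at hc hc'
  rw [beq_iff_eq] at *
  exact hs2 (by rw [← (by simpa using hc.2 : pvGet g c.1 c.2 = s)]; simpa using hc'.2)

lemma pvNodesW_mem (g : List (List String)) (c : PVCell) :
    c ∈ pvWilds g ↔ pvPB g (fun x => x == "WD") c := by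
  rw [pvWilds_eq, List.mem_filter, pvMem_cellsList]
  unfold pvPB
  tauto

lemma pvNodesW_nodup (g : List (List String)) : (pvWilds g).Nodup := by
  rw [pvWilds_eq]
  exact (pvCellsList_nodup g).filter _

/-- one full in-place sweep: labels stay represented, connected and non-increasing;
    an unchanged sweep certifies a fixpoint on the swept cells. -/
lemma pvPassA_main (g : List (List String)) (ok : String → Bool) (nodes : List PVCell)
    (hnd : nodes.Nodup) (hmem : ∀ c, c ∈ nodes ↔ pvPB g ok c) :
    ∀ (order : List PVCell), (∀ c ∈ order, c ∈ nodes) →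
      ∀ (d : PySem.Dict PVCell PVCell) (F : PVCell → PVCell) (b : Bool),
      pvRep nodes d F →
      (∀ c ∈ nodes, F c ∈ nodes ∧ pvReach (pvPB g ok) c (F c)) →
      ∃ F', pvRep nodes (order.foldl pvPAStep (d, b)).1 F' ∧
        (∀ c ∈ nodes, F' c ∈ nodes ∧ pvReach (pvPB g ok) c (F' c)) ∧
        pvMeasure g nodes F' ≤ pvMeasure g nodes F ∧
        ((order.foldl pvPAStep (d, b)).2 = false →
          (order.foldl pvPAStep (d, b)).1 = d ∧
            ∀ c ∈ order, pvMinLabel d c = d.getD c c) ∧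
        ((order.foldl pvPAStep (d, b)).2 = true →
          b = true ∨ pvMeasure g nodes F' < pvMeasure g nodes F) := by
  intro order
  induction order with
  | nil =>
    intro _ d F b hrep hinv
    exact ⟨F, hrep, hinv, le_refl _, fun hb => ⟨rfl, by simp⟩, fun hb => Or.inl hb⟩
  | cons c t ih =>
    intro horder d F b hrep hinv
    have hc : c ∈ nodes := horder c List.mem_cons_self
    have hgetD : d.getD c c = F c := pvRep_getD hnd hrep hc c
    simp only [List.foldl_cons]
    by_cases hch : pvMinLabel d c ≠ d.getD c c
    · -- the cell changes: strict decrease, flag set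
      set m := pvMinLabel d c with hm
      have hstep : pvPAStep (d, b) c = (d.insert c m, true) := by
        unfold pvPAStep
        rw [if_pos hch]
      have hmle : pvLtB (F c) m = false := by
        rw [hm, pvMinLabel_eq_fold, hgetD]
        exact pvFold_le d (pvNbrs c) (F c)
      have hmne : m ≠ F c := by rw [hgetD] at hch; exact hch
      have hmlt : pvLtB m (F c) = true := by
        rcases pvLtB_total hmne with h | h
        · exact h
        · rw [hmle] at h; simp at h
      have hmprop : m ∈ nodes ∧ pvReach (pvPB g ok) c m := by
        rw [hm, pvMinLabel_eq_fold, hgetD]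
        rcases pvFold_mem d (pvNbrs c) (F c) with h | ⟨nb, hnb, hsome⟩
        · rw [h]; exact hinv c hc
        · obtain ⟨hnbn, hveq⟩ := pvRep_get?_inv hrep hsome
          rw [hveq]
          exact ⟨(hinv nb hnbn).1,
            Relation.ReflTransGen.head ⟨hnb, (hmem nb).1 hnbn⟩ (hinv nb hnbn).2⟩
      set F1 : PVCell → PVCell := fun x => if x = c then m else F x with hF1
      have hrep1 : pvRep nodes (d.insert c m) F1 := pvRep_insert hrep hc m
      have hinv1 : ∀ x ∈ nodes, F1 x ∈ nodes ∧ pvReach (pvPB g ok) x (F1 x) := by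
        intro x hx
        by_cases hxc : x = c
        · subst hxc; simpa [hF1] using hmprop
        · simpa [hF1, hxc] using hinv x hx
      have hbF : ∀ x ∈ nodes, 0 ≤ (F x).1 ∧ (F x).1 < pvR g ∧ 0 ≤ (F x).2 ∧ (F x).2 < pvC g := by
        intro x hx
        have := (hmem (F x)).1 (hinv x hx).1
        exact ⟨this.1, this.2.1, this.2.2.1, this.2.2.2.1⟩
      have hbm : 0 ≤ m.1 ∧ m.1 < pvR g ∧ 0 ≤ m.2 ∧ m.2 < pvC g := by
        have := (hmem m).1 hmprop.1
        exact ⟨this.1, this.2.1, this.2.2.1, this.2.2.2.1⟩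
      have hmeas1 : pvMeasure g nodes F1 < pvMeasure g nodes F := by
        apply pvSum_lt
        · intro x hx
          show pvIdx g (F1 x) ≤ pvIdx g (F x)
          by_cases hxc : x = c
          · subst hxc
            simp only [hF1, if_pos rfl]
            exact le_of_lt (pvIdx_lt g hbm (hbF _ hc) hmlt)
          · simp [hF1, hxc]
        · refine ⟨c, hc, ?_⟩
          show pvIdx g (F1 c) < pvIdx g (F c)
          simp only [hF1, if_pos rfl]
          exact pvIdx_lt g hbm (hbF _ hc) hmlt
      obtain ⟨F', hrep', hinv', hle', hfalse', htrue'⟩ :=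
        ih (fun x hx => horder x (List.mem_cons_of_mem _ hx)) (d.insert c m) F1 true hrep1 hinv1
      rw [hstep]
      refine ⟨F', hrep', hinv', le_of_lt (lt_of_le_of_lt hle' hmeas1), ?_, ?_⟩
      · intro hb
        obtain ⟨-, -⟩ := hfalse' hb
        -- the flag can no longer be false after it was set: derive a contradiction
        exfalso
        have hflag : ∀ (t' : List PVCell) (p : PySem.Dict PVCell PVCell × Bool),
            p.2 = true → (t'.foldl pvPAStep p).2 = true := by
          intro t'
          induction t' with
          | nil => intro p hp; exact hp
          | cons a t'' ih2 =>
            intro p hp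
            simp only [List.foldl_cons]
            refine ih2 _ ?_
            show (if pvMinLabel p.1 a ≠ p.1.getD a a then (p.1.insert a (pvMinLabel p.1 a), true)
              else p).2 = true
            by_cases h : pvMinLabel p.1 a ≠ p.1.getD a a
            · rw [if_pos h]
            · rw [if_neg h]; exact hp
        have := hflag t (d.insert c m, true) rfl
        rw [this] at hb
        exact Bool.true_eq_false.mp hb
      · intro _
        exact Or.inr (lt_of_le_of_lt hle' hmeas1)
    · -- unchanged cell
      have hstep : pvPAStep (d, b) c = (d, b) := by
        unfold pvPAStep
        rw [if_neg hch]
      rw [hstep]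
      obtain ⟨F', hrep', hinv', hle', hfalse', htrue'⟩ :=
        ih (fun x hx => horder x (List.mem_cons_of_mem _ hx)) d F b hrep hinv
      refine ⟨F', hrep', hinv', hle', ?_, htrue'⟩
      intro hb
      obtain ⟨h1, h2⟩ := hfalse' hb
      refine ⟨h1, ?_⟩
      intro x hx
      rcases List.mem_cons.1 hx with rfl | hx
      · rw [not_not] at hch; exact hch
      · exact h2 x hx

/-- the alternating while-loop reaches a fixpoint whose labels connect each cell to its value. -/
lemma pvPropLoop_char (g : List (List String)) (ok : String → Bool)
    (nodes : List PVCell) (hnd : nodes.Nodup)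
    (hmem : ∀ c, c ∈ nodes ↔ pvPB g ok c) :
    ∀ (f : Nat) (fwd : Bool) (d : PySem.Dict PVCell PVCell) (F : PVCell → PVCell),
      pvRep nodes d F →
      (∀ c ∈ nodes, F c ∈ nodes ∧ pvReach (pvPB g ok) c (F c)) →
      pvMeasure g nodes F < f →
      ∃ F', pvRep nodes (pvPropLoop nodes f fwd d) F' ∧
        (∀ c ∈ nodes, F' c ∈ nodes ∧ pvReach (pvPB g ok) c (F' c)) ∧
        (∀ c ∈ nodes, ∀ nb ∈ pvNbrs c, nb ∈ nodes → F' nb = F' c) := by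
  intro f
  induction f with
  | zero => intro fwd d F _ _ hm; omega
  | succ f ih =>
    intro fwd d F hrep hinv hm
    have horder : ∀ c ∈ (if fwd then nodes else nodes.reverse), c ∈ nodes := by
      intro c hc
      cases fwd <;> simpa using hc
    obtain ⟨F1, hrep1, hinv1, hle1, hfalse1, htrue1⟩ :=
      pvPassA_main g ok nodes hnd hmem _ horder d F false hrep hinv
    simp only [pvPropLoop, pvPassA]
    by_cases hb2 : ((if fwd then nodes else nodes.reverse).foldl pvPAStep (d, false)).2 = true
    · rw [if_pos hb2]
      have hstrict : pvMeasure g nodes F1 < pvMeasure g nodes F := by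
        rcases htrue1 hb2 with h | h
        · simp at h
        · exact h
      exact ih (!fwd) _ F1 hrep1 hinv1 (by omega)
    · rw [Bool.not_eq_true] at hb2
      rw [if_neg (by simp [hb2])]
      obtain ⟨heqd, hfix'⟩ := hfalse1 hb2
      have hfix : ∀ c ∈ nodes, pvMinLabel d c = d.getD c c := by
        intro c hc
        refine hfix' c ?_
        cases fwd
        · simpa using hc
        · simpa using hc
      rw [heqd]
      refine ⟨F, hrep, hinv, ?_⟩
      intro c hc nb hnb hnbn
      have hgc : d.getD c c = F c := pvRep_getD hnd hrep hc c
      have hgnb : d.getD nb nb = F nb := pvRep_getD hnd hrep hnbn nb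
      have hle1' : pvLtB (F nb) (F c) = false := by
        have := pvFold_le_mem d (pvNbrs c) (d.getD c c) nb (F nb) hnb
          (pvRep_get? hnd hrep hnbn)
        rw [← pvMinLabel_eq_fold, hfix c hc, hgc] at this
        exact this
      have hle2' : pvLtB (F c) (F nb) = false := by
        have := pvFold_le_mem d (pvNbrs nb) (d.getD nb nb) c (F c)
          (pvNbrs_symm hnb) (pvRep_get? hnd hrep hc)
        rw [← pvMinLabel_eq_fold, hfix nb hnbn, hgnb] at this
        exact this
      exact pvLtB_antisymm hle1' hle2'

/-- generic component characterization: duplicate-free, members = reachable cells. -/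
lemma pvComponentAux (g : List (List String)) (ok : String → Bool) (nodes : List PVCell)
    (hnd : nodes.Nodup) (hmem : ∀ c, c ∈ nodes ↔ pvPB g ok c) (seed : PVCell)
    (hseedm : seed ∈ nodes) :
    ((nodes.foldl (fun d c =>
        d.modify ((pvPropLoop nodes (pvFuelB g) true
            (nodes.foldl (fun d c => d.insert c c) PySem.Dict.empty)).getD c c) []
          (· ++ [c])) PySem.Dict.empty).getD
      ((pvPropLoop nodes (pvFuelB g) true
          (nodes.foldl (fun d c => d.insert c c) PySem.Dict.empty)).getD seed seed) []).Nodup ∧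
    ∀ x, (x ∈ (nodes.foldl (fun d c =>
        d.modify ((pvPropLoop nodes (pvFuelB g) true
            (nodes.foldl (fun d c => d.insert c c) PySem.Dict.empty)).getD c c) []
          (· ++ [c])) PySem.Dict.empty).getD
      ((pvPropLoop nodes (pvFuelB g) true
          (nodes.foldl (fun d c => d.insert c c) PySem.Dict.empty)).getD seed seed) []) ↔
      pvReach (pvPB g ok) seed x := by
  set label := pvPropLoop nodes (pvFuelB g) true
    (nodes.foldl (fun d c => d.insert c c) PySem.Dict.empty) with hlabel
  rw [pvGroup_getD nodes (fun c => label.getD c c) (label.getD seed seed)]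
  -- initial dict represents the identity
  have hrep0 : pvRep nodes (nodes.foldl (fun d c => d.insert c c) PySem.Dict.empty)
      (fun c => c) := by
    unfold pvRep
    have := PySem.Dict.items_foldl_insert_fresh (l := nodes) (k := fun c => c)
      (v := fun c => c) (d := PySem.Dict.empty)
      (by intro a _; exact PySem.Dict.contains_empty a) (by simpa using hnd)
    simpa using this
  -- fuel bound
  have hsub : ∀ c ∈ nodes, c ∈ pvCellsList g := by
    intro c hc
    have := (hmem c).1 hc
    exact (pvMem_cellsList g c).2 ⟨this.1, this.2.1, this.2.2.1, this.2.2.2.1⟩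
  have hlen : nodes.length ≤ g.length * (PySem.List.pyGetD g 0 []).length := by
    calc nodes.length ≤ (pvCellsList g).length :=
          (List.subperm_of_subset hnd hsub).length_le
      _ = _ := pvCellsList_len g
  have hfuel : pvMeasure g nodes (fun c => c) < pvFuelB g := by
    have hbound : ∀ x ∈ nodes.map fun c => pvIdx g c,
        x ≤ g.length * (PySem.List.pyGetD g 0 []).length := by
      intro x hx
      obtain ⟨c, hc, rfl⟩ := List.mem_map.1 hx
      have := (hmem c).1 hc
      exact pvIdx_bound g ⟨this.1, this.2.1, this.2.2.1, this.2.2.2.1⟩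
    have := List.sum_le_card_nsmul _ _ hbound
    unfold pvMeasure pvFuelB
    simp only [smul_eq_mul, List.length_map] at this ⊢
    calc (nodes.map fun c => pvIdx g c).sum
        ≤ nodes.length * (g.length * (PySem.List.pyGetD g 0 []).length) := this
      _ ≤ (g.length * (PySem.List.pyGetD g 0 []).length) *
            (g.length * (PySem.List.pyGetD g 0 []).length) :=
          Nat.mul_le_mul_right _ hlen
      _ < _ := Nat.lt_succ_self _
  obtain ⟨F, hrep, hinv, hfix⟩ := pvPropLoop_char g ok nodes hnd hmem
    (pvFuelB g) true _ (fun c => c) hrep0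
    (fun c hc => ⟨hc, Relation.ReflTransGen.refl⟩) hfuel
  rw [← hlabel] at hrep
  have hgetD : ∀ c ∈ nodes, label.getD c c = F c := fun c hc => pvRep_getD hnd hrep hc c
  constructor
  · exact hnd.filter _
  · intro x
    rw [List.mem_filter]
    constructor
    · rintro ⟨hx, heq⟩
      rw [beq_iff_eq, hgetD x hx, hgetD seed hseedm] at heq
      have h1 : pvReach (pvPB g ok) x (F x) := (hinv x hx).2
      have h2 : pvReach (pvPB g ok) seed (F seed) := (hinv seed hseedm).2
      have h3 : pvReach (pvPB g ok) (F x) x := pvReach_symm _ ((hmem x).1 hx) h1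
      exact Relation.ReflTransGen.trans (heq ▸ h2) h3
    · intro hr
      have hx : x ∈ nodes := by
        rcases pvReach_last _ hr with rfl | hP
        · exact hseedm
        · exact (hmem x).2 hP
      refine ⟨hx, ?_⟩
      rw [beq_iff_eq, hgetD x hx, hgetD seed hseedm]
      have hconst : ∀ {y}, pvReach (pvPB g ok) seed y → F y = F seed := by
        intro y hy
        induction hy with
        | refl => rfl
        | @tail c b hac hstep ihy =>
          have hcN : c ∈ nodes := by
            rcases pvReach_last _ hac with rfl | hP
            · exact hseedm
            · exact (hmem c).2 hP
          have hbN : b ∈ nodes := (hmem b).2 hstep.2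
          rw [← ihy]
          exact hfix c hcN b hstep.1 hbN
      exact hconst hr

/-- B's phase-1 component is exactly the reachable set. -/
lemma pvComponent_char_some (g : List (List String)) (s : String)
    (hs1 : s ∉ pvNC) (hs2 : s ≠ "WD") (seed : PVCell)
    (hseed : pvPB g (fun x => decide (x ∉ pvNC ∧ (x = s ∨ x = "WD"))) seed) :
    (pvComponent g seed (some s)).Nodup ∧
      ∀ x, x ∈ pvComponent g seed (some s) ↔
        pvReach (pvPB g (fun x => decide (x ∉ pvNC ∧ (x = s ∨ x = "WD")))) seed x := by
  have := pvComponentAux g (fun x => decide (x ∉ pvNC ∧ (x = s ∨ x = "WD")))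
    ((pvBySym g).getD s [] ++ pvWilds g) (pvNodes1_nodup g s hs2)
    (pvNodes1_mem g s hs1) seed ((pvNodes1_mem g s hs1 seed).2 hseed)
  exact this

/-- B's wild component is exactly the reachable set. -/
lemma pvComponent_char_none (g : List (List String)) (seed : PVCell)
    (hseed : pvPB g (fun x => x == "WD") seed) :
    (pvComponent g seed none).Nodup ∧
      ∀ x, x ∈ pvComponent g seed none ↔
        pvReach (pvPB g (fun x => x == "WD")) seed x := by
  have := pvComponentAux g (fun x => x == "WD") (pvWilds g) (pvNodesW_nodup g)
    (pvNodesW_mem g) seed ((pvNodesW_mem g seed).2 hseed)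
  exact this

-- ===== glue: the two region computations compute the same set =====
lemma pvReach_congr (P Q : PVCell → Prop) (h : ∀ c, P c ↔ Q c) (s t : PVCell) :
    pvReach P s t ↔ pvReach Q s t := by
  constructor
  · exact Relation.ReflTransGen.mono (fun a b hab => ⟨hab.1, (h b).1 hab.2⟩)
  · exact Relation.ReflTransGen.mono (fun a b hab => ⟨hab.1, (h b).2 hab.2⟩)

lemma pvNbrs_eq_map (c : PVCell) :
    pvNbrs c = pvDirs.map (fun d => (c.1 + d.1, c.2 + d.2)) := by
  simp [pvNbrs, pvDirs, sub_eq_add_neg]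

lemma pvKeep_eq_interior (g : List (List String)) (c : PVCell) :
    pvKeep g c = pvInterior g c := by
  rw [pvInterior, pvNbrs_eq_map, List.all_map, pvKeep]
  congr 1
  funext d
  rw [Bool.eq_iff_iff]
  simp only [Function.comp_apply, decide_eq_true_eq, Bool.or_eq_true, Bool.not_eq_eq_eq_not,
    Bool.not_true, decide_eq_false_iff_not, beq_iff_eq, not_and_or, not_le, not_lt]
  tauto

/-- phase 1: A's cluster set is a permutation of B's component -/
lemma pvCell_perm1 (g : List (List String)) (i j : Int)
    (hin : 0 ≤ i ∧ i < pvR g ∧ 0 ≤ j ∧ j < pvC g)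
    (hnc : pvGet g i j ∉ pvNC) (hwd : pvGet g i j ≠ "WD") :
    ((dfsLoop g (pvGet g i j) (pvFuelA g) [(i, j)] [] []).2).Perm
      (pvComponent g (i, j) (some (pvGet g i j))) := by
  obtain ⟨handA, hmemA⟩ := pvDfs_char g i j hin hnc hwd
  obtain ⟨handB, hmemB⟩ := pvComponent_char_some g (pvGet g i j) hnc hwd (i, j)
    ⟨hin.1, hin.2.1, hin.2.2.1, hin.2.2.2, by simp [hnc]⟩
  rw [List.perm_ext_iff_of_nodup handA handB]
  intro x
  rw [hmemA, hmemB]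
  apply pvReach_congr
  intro c
  simp only [pvOk1, pvPB, decide_eq_true_eq]

/-- phase 2: A's filtered wild cluster is a permutation of B's filtered component -/
lemma pvCell_perm2 (g : List (List String)) (i j : Int)
    (hin : 0 ≤ i ∧ i < pvR g ∧ 0 ≤ j ∧ j < pvC g)
    (hwd : pvGet g i j = "WD") :
    ((wildLoop g (pvFuelA g) [(i, j)] [] []).2).Perm
      ((pvComponent g (i, j) none).filter (pvInterior g)) := by
  obtain ⟨hsnd, handA, hmemA⟩ := pvWild_char g i j hin hwd
  obtain ⟨handB, hmemB⟩ := pvComponent_char_none g (i, j)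
    ⟨hin.1, hin.2.1, hin.2.2.1, hin.2.2.2, by simp [hwd]⟩
  have hperm : ((wildLoop g (pvFuelA g) [(i, j)] [] []).1).Perm
      (pvComponent g (i, j) none) := by
    rw [List.perm_ext_iff_of_nodup handA handB]
    intro x
    rw [hmemA, hmemB]
    apply pvReach_congr
    intro c
    simp only [pvOkW, pvPB, beq_iff_eq]
  rw [hsnd]
  have hfeq : List.filter (pvKeep g) (pvComponent g (i, j) none) =
      List.filter (pvInterior g) (pvComponent g (i, j) none) :=
    List.filter_congr (fun c _ => pvKeep_eq_interior g c)
  exact hfeq ▸ hperm.filter (pvKeep g)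

-- ===== glue: the scans =====
def pvRelS (sA : PVStA) (p : PySem.Set PVCell × List (Int × String)) : Prop :=
  (∀ x, x ∈ sA.acc ↔ x ∈ p.1) ∧ sA.acc.Nodup ∧ p.1.Nodup ∧
  sA.sizes.length = sA.symbols.length ∧ p.2 = sA.sizes.zip sA.symbols ∧
  sA.clusters.length = sA.sizes.length

lemma pvRecord_rel (sA : PVStA) (p : PySem.Set PVCell × List (Int × String))
    (cA cB : PySem.Set PVCell) (sym : String) (h : pvRelS sA p) (hperm : cA.Perm cB) :
    pvRelS
      (if (if 4 ≤ cA.length then cA else []) ≠ [] then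
        ⟨PySem.Set.update sA.acc (if 4 ≤ cA.length then cA else []),
         sA.clusters ++ [if 4 ≤ cA.length then cA else []],
         sA.sizes ++ [((if 4 ≤ cA.length then cA else []).length : Int)],
         sA.symbols ++ [sym]⟩
      else sA)
      (pvRecord p cB sym) := by
  obtain ⟨hmem, hndA, hndB, hlen, hzip, hclu⟩ := h
  have hlencc : cA.length = cB.length := hperm.length_eq
  by_cases h4 : 4 ≤ cA.length
  · have h4B : 4 ≤ cB.length := by omega
    have hne : cA ≠ [] := by
      intro hnil; rw [hnil] at h4; simp at h4
    rw [if_pos h4, if_pos hne, pvRecord, if_pos h4B]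
    refine ⟨?_, ?_, ?_, ?_, ?_, ?_⟩
    · intro x
      simp only [PySem.Set.mem_update]
      rw [hmem x, hperm.mem_iff]
    · exact PySem.Set.nodup_update _ _ hndA
    · exact PySem.Set.nodup_update _ _ hndB
    · simp [hlen]
    · rw [List.zip_append hlen, ← hzip, hlencc]
      simp
    · simp [hclu]
  · have h4B : ¬ 4 ≤ cB.length := by omega
    rw [if_neg h4, pvRecord, if_neg h4B]
    simp only [ne_eq, not_true_eq_false, if_false]
    exact ⟨hmem, hndA, hndB, hlen, hzip, hclu⟩

lemma pvStep1_rel (g : List (List String)) (i j : Int)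
    (hi : 0 ≤ i ∧ i < pvR g) (hj : 0 ≤ j ∧ j < pvC g)
    (sA : PVStA) (p : PySem.Set PVCell × List (Int × String)) (h : pvRelS sA p) :
    pvRelS (pvStepA1 g sA i j) (pvStepB g 1 p i j) := by
  rw [pvStepA1, pvStepB]
  by_cases hacc : (i, j) ∈ sA.acc
  · rw [if_pos hacc, if_pos ((h.1 _).1 hacc)]; exact h
  · rw [if_neg hacc, if_neg (fun hb => hacc ((h.1 _).2 hb))]
    simp only []
    by_cases hsym : pvGet g i j ∈ pvNC ∨ pvGet g i j = "WD"
    · rw [if_pos hsym]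
      simp only [pvDfs, if_pos hsym, ne_eq, not_true_eq_false, if_false]
      exact h
    · rw [if_neg hsym]
      rw [not_or] at hsym
      simp only [pvDfs, if_neg (not_or.2 hsym)]
      exact pvRecord_rel sA p _ _ (pvGet g i j) h
        (pvCell_perm1 g i j ⟨hi.1, hi.2, hj.1, hj.2⟩ hsym.1 hsym.2)

lemma pvStep2_rel (g : List (List String)) (i j : Int)
    (hi : 0 ≤ i ∧ i < pvR g) (hj : 0 ≤ j ∧ j < pvC g)
    (sA : PVStA) (p : PySem.Set PVCell × List (Int × String)) (h : pvRelS sA p) :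
    pvRelS (pvStepA2 g sA i j) (pvStepB g 2 p i j) := by
  rw [pvStepA2, pvStepB]
  by_cases hacc : (i, j) ∈ sA.acc
  · rw [if_pos hacc, if_pos ((h.1 _).1 hacc)]; exact h
  · rw [if_neg hacc, if_neg (fun hb => hacc ((h.1 _).2 hb))]
    simp only [if_neg (by norm_num : ¬ (2 : Int) = 1)]
    by_cases hwd : pvGet g i j ≠ "WD"
    · rw [if_pos hwd]
      simp only [pvDfsWild, if_pos hwd, ne_eq, not_true_eq_false, if_false]
      exact h
    · rw [if_neg hwd]
      rw [not_not] at hwd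
      simp only [pvDfsWild, if_neg (not_not.2 hwd)]
      exact pvRecord_rel sA p _ _ (pvGet g i j) h
        (pvCell_perm2 g i j ⟨hi.1, hi.2, hj.1, hj.2⟩ hwd)

lemma pvFoldRel {α : Type} (l : List α) (fA : PVStA → α → PVStA)
    (fB : (PySem.Set PVCell × List (Int × String)) → α → PySem.Set PVCell × List (Int × String))
    (h : ∀ a ∈ l, ∀ s p, pvRelS s p → pvRelS (fA s a) (fB p a)) :
    ∀ (s : PVStA) (p : PySem.Set PVCell × List (Int × String)), pvRelS s p →
      pvRelS (l.foldl fA s) (l.foldl fB p) := by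
  induction l with
  | nil => intro s p h0; exact h0
  | cons a l ih =>
    intro s p h0
    exact ih (fun a ha => h a (List.mem_cons_of_mem _ ha)) _ _ (h a List.mem_cons_self s p h0)

-- ===== VERDICT =====
theorem count_clusters_spec : Claim_equal_count_clusters := by
  intro grid _ _
  show count_clusters grid = count_clusters_alt grid
  rw [count_clusters, count_clusters_alt]
  simp only [List.foldl_cons, List.foldl_nil]
  have hinit : pvRelS ⟨[], [], [], []⟩ ([], []) :=
    ⟨fun x => Iff.rfl, List.nodup_nil, List.nodup_nil, rfl, rfl, rfl⟩
  have hstep1 : ∀ i ∈ PySem.List.pyRange 0 (pvR grid) 1, ∀ s p, pvRelS s p →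
      pvRelS ((PySem.List.pyRange 0 (pvC grid) 1).foldl (fun s j => pvStepA1 grid s i j) s)
        ((PySem.List.pyRange 0 (pvC grid) 1).foldl (fun p j => pvStepB grid 1 p i j) p) := by
    intro i hi s p hsp
    refine pvFoldRel _ _ _ ?_ s p hsp
    intro j hj s' p' h'
    exact pvStep1_rel grid i j
      (by rw [PySem.List.mem_pyRange_one] at hi; exact hi)
      (by rw [PySem.List.mem_pyRange_one] at hj; exact hj) s' p' h'
  have hstep2 : ∀ i ∈ PySem.List.pyRange 0 (pvR grid) 1, ∀ s p, pvRelS s p →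
      pvRelS ((PySem.List.pyRange 0 (pvC grid) 1).foldl (fun s j => pvStepA2 grid s i j) s)
        ((PySem.List.pyRange 0 (pvC grid) 1).foldl (fun p j => pvStepB grid 2 p i j) p) := by
    intro i hi s p hsp
    refine pvFoldRel _ _ _ ?_ s p hsp
    intro j hj s' p' h'
    exact pvStep2_rel grid i j
      (by rw [PySem.List.mem_pyRange_one] at hi; exact hi)
      (by rw [PySem.List.mem_pyRange_one] at hj; exact hj) s' p' h'
  have h1 := pvFoldRel _ _ _ hstep1 _ _ hinit
  have h2 := pvFoldRel _ _ _ hstep2 _ _ h1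
  obtain ⟨hmem, hndA, hndB, hlen, hzip, hclu⟩ := h2
  rw [hzip]
  refine Prod.ext ?_ rfl
  simp only [PySem.List.len_eq, List.length_zip, hlen, hclu]
  simp
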